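-- pv_equiv track=rewrite | github.com/emilycheera/coding-challenges | is_valid_routing_num.py | is_routing_number
-- ===== SOURCE A (Python) =====
-- def is_routing_number(num):
--
--     digits = []
--
--     while num > 0:
--         digits.append(num % 10)
--         num //= 10
--
--     digits.reverse()
--
--     if len(digits) != 9:
--         return False
--
--     routing_sum = (3 * (digits[0] + digits[3] + digits[6])) + (
--         7 * (digits[1] + digits[4] + digits[7]) + digits[2] + digits[5] + digits[8]
--     )
--
--     return routing_sum % 10 == 0
-- ===== SOURCE B (Python) =====
-- def is_routing_number(num):
--     # Single pass: weights from the least-significant digit cycle 1, 7, 3.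
--     weights = (1, 7, 3)
--     total = 0
--     count = 0
--     while num > 0:
--         total += (num % 10) * weights[count % 3]
--         num //= 10
--         count += 1
--     if count != 9:
--         return False
--     return total % 10 == 0
-- ===== Notes on version B (the rewrite author's own statement) =====
-- stated objective: simpler
-- what changed: B computes the weighted checksum in one pass while extracting digits with a cycling weight table, instead of building a digit list, reversing it, and summing by fixed indices.
import Mathlib
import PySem

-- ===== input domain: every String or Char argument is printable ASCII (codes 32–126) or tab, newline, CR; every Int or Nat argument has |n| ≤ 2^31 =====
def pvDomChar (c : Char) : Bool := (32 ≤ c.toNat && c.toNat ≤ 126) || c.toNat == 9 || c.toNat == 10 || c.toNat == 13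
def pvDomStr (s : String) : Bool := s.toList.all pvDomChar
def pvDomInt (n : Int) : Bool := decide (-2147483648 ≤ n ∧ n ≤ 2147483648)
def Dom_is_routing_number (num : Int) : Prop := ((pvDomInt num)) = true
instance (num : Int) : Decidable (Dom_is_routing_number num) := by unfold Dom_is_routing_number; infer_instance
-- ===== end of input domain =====

-- B changes the decomposition, not the behaviour: one accumulation pass with cycling weights instead of list build + reverse + fixed-index sum.

-- ===== PORT A =====
-- termination helper for both while-loops (num //= 10 strictly decreases for num > 0)
theorem pvDiv10_lt (num : Int) (h : num > 0) :
    (PySem.Int.floordiv num 10).toNat < num.toNat := by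
  rw [PySem.Int.floordiv_eq_ediv_of_pos (by norm_num)]
  have h1 := Int.mul_ediv_add_emod num 10
  have h2 := Int.emod_nonneg num (by norm_num : (10:Int) ≠ 0)
  have h3 := Int.emod_lt_of_pos num (show (0:Int) < 10 by norm_num)
  omega

-- the `while num > 0: digits.append(num % 10); num //= 10` loop
def pvBuildDigits (num : Int) (acc : List Int) : List Int :=
  if h : num > 0 then
    pvBuildDigits (PySem.Int.floordiv num 10) (acc ++ [PySem.Int.mod num 10])
  else acc
termination_by num.toNat
decreasing_by exact pvDiv10_lt num h

def is_routing_number (num : Int) : Bool :=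
  let digits := pvBuildDigits num []
  let digits := digits.reverse
  if digits.length ≠ 9 then false
  else
    -- digits[i]: in range under the length-9 guard, so the IndexError branch is unreachable
    let g := fun (i : Int) => (PySem.List.pyGet? digits i).getD 0
    let routing_sum :=
      3 * (g 0 + g 3 + g 6) + (7 * (g 1 + g 4 + g 7) + g 2 + g 5 + g 8)
    decide (PySem.Int.mod routing_sum 10 = 0)

-- ===== PORT B =====
-- the `while num > 0: total += (num % 10) * weights[count % 3]; num //= 10; count += 1` loop
def pvLoopB (num total count : Int) : Int × Int :=
  if h : num > 0 then
    pvLoopB (PySem.Int.floordiv num 10)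
      (total + PySem.Int.mod num 10 *
        (PySem.List.pyGet? [1, 7, 3] (PySem.Int.mod count 3)).getD 0)
      (count + 1)
  else (total, count)
termination_by num.toNat
decreasing_by exact pvDiv10_lt num h

def is_routing_number_alt (num : Int) : Bool :=
  let p := pvLoopB num 0 0
  if p.2 ≠ 9 then false
  else decide (PySem.Int.mod p.1 10 = 0)

-- ===== PRECONDITION & SPEC =====
def Spec_is_routing_number (num : Int) (out : Bool) : Prop := out = is_routing_number_alt num
instance (num : Int) (out : Bool) : Decidable (Spec_is_routing_number num out) := by unfold Spec_is_routing_number; infer_instance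

-- ===== CLAIM (what is proved, stated in full; the proofs are below) =====
def Claim_equal_is_routing_number : Prop := ∀ (num : Int), Dom_is_routing_number num → Spec_is_routing_number num (is_routing_number num)

-- ===== LEMMAS AND PROOFS =====

-- weighted sum of the LSB-first digit list, weights cycling 1,7,3 starting at position c
def pvWsum : List Int → Int → Int
  | [], _ => 0
  | d :: l, c =>
      d * (PySem.List.pyGet? [1, 7, 3] (PySem.Int.mod c 3)).getD 0 + pvWsum l (c + 1)

theorem pvBuildDigits_pos (num : Int) (acc : List Int) (h : num > 0) :
    pvBuildDigits num acc =
      pvBuildDigits (PySem.Int.floordiv num 10) (acc ++ [PySem.Int.mod num 10]) := by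
  rw [pvBuildDigits]; simp [h]

theorem pvBuildDigits_nonpos (num : Int) (acc : List Int) (h : ¬ num > 0) :
    pvBuildDigits num acc = acc := by
  rw [pvBuildDigits]; simp [h]

theorem pvLoopB_pos (num total count : Int) (h : num > 0) :
    pvLoopB num total count =
      pvLoopB (PySem.Int.floordiv num 10)
        (total + PySem.Int.mod num 10 *
          (PySem.List.pyGet? [1, 7, 3] (PySem.Int.mod count 3)).getD 0)
        (count + 1) := by
  rw [pvLoopB]; simp [h]

theorem pvLoopB_nonpos (num total count : Int) (h : ¬ num > 0) :
    pvLoopB num total count = (total, count) := by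
  rw [pvLoopB]; simp [h]

theorem pvBuildDigits_append : ∀ (n : Nat) (num : Int) (acc : List Int),
    num.toNat = n → pvBuildDigits num acc = acc ++ pvBuildDigits num [] := by
  intro n
  induction n using Nat.strong_induction_on with
  | _ n ih =>
    intro num acc hn
    by_cases h : num > 0
    · rw [pvBuildDigits_pos num acc h, pvBuildDigits_pos num [] h,
          ih _ (hn ▸ pvDiv10_lt num h) _ (acc ++ [PySem.Int.mod num 10]) rfl,
          ih _ (hn ▸ pvDiv10_lt num h) _ ([] ++ [PySem.Int.mod num 10]) rfl]
      simp
    · rw [pvBuildDigits_nonpos num acc h, pvBuildDigits_nonpos num [] h,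
          List.append_nil]

theorem pvLoopB_eq : ∀ (n : Nat) (num total count : Int), num.toNat = n →
    pvLoopB num total count =
      (total + pvWsum (pvBuildDigits num []) count,
       count + (pvBuildDigits num []).length) := by
  intro n
  induction n using Nat.strong_induction_on with
  | _ n ih =>
    intro num total count hn
    by_cases h : num > 0
    · rw [pvLoopB_pos num total count h,
          ih _ (hn ▸ pvDiv10_lt num h) _ _ _ rfl,
          pvBuildDigits_pos num [] h,
          pvBuildDigits_append (PySem.Int.floordiv num 10).toNat _
            ([] ++ [PySem.Int.mod num 10]) rfl]
      simp only [List.nil_append, List.singleton_append, pvWsum, List.length_cons,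
        Prod.mk.injEq]
      constructor
      · ring
      · push_cast; ring
    · rw [pvLoopB_nonpos num total count h, pvBuildDigits_nonpos num [] h]
      simp [pvWsum]

theorem is_routing_number_spec : Claim_equal_is_routing_number := by
  intro num _
  unfold Spec_is_routing_number is_routing_number is_routing_number_alt
  rw [pvLoopB_eq num.toNat num 0 0 rfl]
  generalize pvBuildDigits num [] = l
  by_cases hlen : l.length = 9
  · match l, hlen with
    | [a, b, c, d, e, f, g, h, i], _ =>
      simp only [List.reverse_cons, List.reverse_nil, List.nil_append, List.cons_append,
        List.length_cons, List.length_nil, pvWsum]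
      norm_num [PySem.List.pyGet?, PySem.List.pyIdx?, show ((2:Int).toNat = 2) from rfl,
        show ((3:Int).toNat = 3) from rfl, show ((4:Int).toNat = 4) from rfl,
        show ((5:Int).toNat = 5) from rfl, show ((6:Int).toNat = 6) from rfl,
        show ((7:Int).toNat = 7) from rfl, show ((8:Int).toNat = 8) from rfl,
        PySem.Int.mod_eq_emod_of_pos (show (0:Int) < 3 by norm_num),
        PySem.Int.mod_eq_emod_of_pos (show (0:Int) < 10 by norm_num)]
      omega
  · rw [if_pos (by simpa using hlen), if_pos (by push_cast; omega)]
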